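-- pv_equiv track=rewrite | github.com/Mercy2Green/m2g_concept_graph | conceptgraph/cg_process/cg_processing.py | get_all_length_combinations
-- ===== SOURCE A (Python) =====
-- def get_all_length_combinations(lst):
--     from itertools import permutations
--     def has_consecutive_duplicates(sequence):
--         return any(x == y for x, y in zip(sequence, sequence[1:]))
--
--     all_combinations = set()
--     for r in range(1, len(lst) + 1):
--         for subset in permutations(lst, r):
--             if not has_consecutive_duplicates(subset):
--                 all_combinations.add(tuple(subset))
--     return all_combinations
-- ===== SOURCE B (Python) =====
-- def _picks(pool):
--     # each element paired with the remaining pool (order preserved)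
--     return [(pool[i], pool[:i] + pool[i + 1:]) for i in range(len(pool))]
--
--
-- def get_all_length_combinations(lst):
--     # Backtracking DFS: extend a prefix only with values different from the
--     # last-placed one, so sequences with consecutive duplicates are pruned
--     # instead of generated-and-filtered; emit at every depth, then bucket by
--     # length and dedup by value-tuple.
--     def dfs(prefix, pool, last):
--         out = []
--         for x, rest in _picks(pool):
--             if x != last:
--                 seq = prefix + (x,)
--                 out.append(seq)
--                 out.extend(dfs(seq, rest, x))
--         return out
--
--     emitted = dfs((), lst, None)
--     result = set()
--     for r in range(1, len(lst) + 1):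
--         for seq in emitted:
--             if len(seq) == r:
--                 result.add(seq)
--     return result
-- ===== Notes on version B (the rewrite author's own statement) =====
-- stated objective: alternative
-- what changed: A generates every r-permutation with itertools and filters out those with consecutive duplicates; B runs a backtracking DFS over (element, remaining-pool) picks that never extends a prefix with the just-placed value, emitting at every depth and bucketing by length, so invalid sequences are pruned instead of generated-and-filtered.
import Mathlib
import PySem

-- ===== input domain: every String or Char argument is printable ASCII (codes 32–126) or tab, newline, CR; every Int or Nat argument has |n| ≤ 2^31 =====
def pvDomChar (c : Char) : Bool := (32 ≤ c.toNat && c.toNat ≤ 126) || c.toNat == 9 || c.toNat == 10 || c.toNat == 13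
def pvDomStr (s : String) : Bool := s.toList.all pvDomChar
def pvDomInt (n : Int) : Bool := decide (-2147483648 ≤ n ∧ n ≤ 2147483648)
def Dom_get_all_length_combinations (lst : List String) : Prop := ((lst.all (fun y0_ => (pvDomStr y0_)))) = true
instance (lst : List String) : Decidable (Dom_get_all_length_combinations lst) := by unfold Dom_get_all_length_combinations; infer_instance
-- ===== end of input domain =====

-- B replaces A's generate-all-permutations-then-filter with a backtracking DFS that
-- prunes every prefix ending in a consecutive duplicate (a different algorithm).

-- ===== PORT A =====
-- has_consecutive_duplicates: any(x == y for x, y in zip(sequence, sequence[1:]))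
def hasConsecDupA (sequence : List String) : Bool :=
  ((sequence.zip (PySem.List.slice sequence (some 1) none)).any (fun p => p.1 == p.2))

def get_all_length_combinations (lst : List String) : List (List String) :=
  (PySem.List.pyRange 1 ((lst.length : Int) + 1) 1).foldl
    (fun all_combinations r =>
      (PySem.List.permutations lst r.toNat).foldl
        (fun all_combinations subset =>
          if !hasConsecDupA subset then PySem.Set.add all_combinations subset
          else all_combinations)
        all_combinations)
    PySem.Set.empty

-- ===== PORT B =====
-- _picks(pool): each element paired with the rest of the pool; this recursion computes
-- exactly the list [(pool[i], pool[:i]+pool[i+1:]) for i in range(len(pool))].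
def picksB : List String → List (String × List String)
  | [] => []
  | x :: xs => (x, xs) :: (picksB xs).map (fun p => (p.1, x :: p.2))

-- termination helper, cited by dfsB's decreasing_by
theorem picksB_mem_length {p : String × List String} :
    ∀ {pool : List String}, p ∈ picksB pool → p.2.length + 1 = pool.length := by
  intro pool
  induction pool generalizing p with
  | nil => intro h; simp [picksB] at h
  | cons x xs ih =>
    intro h
    simp only [picksB, List.mem_cons, List.mem_map] at h
    rcases h with h | ⟨q, hq, rfl⟩
    · subst h; rfl
    · simpa using ih hq

-- dfs(prefix, pool, last): emit prefix+(x,) and recurse, for each (x, rest) in _picks(pool) with x != last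
def dfsB (pre : List String) (pool : List String) (last : Option String) : List (List String) :=
  (picksB pool).attach.flatMap (fun q =>
    if some q.val.1 ≠ last then
      (pre ++ [q.val.1]) :: dfsB (pre ++ [q.val.1]) q.val.2 (some q.val.1)
    else [])
termination_by pool.length
decreasing_by
  have := picksB_mem_length q.property
  omega

def get_all_length_combinations_alt (lst : List String) : List (List String) :=
  let emitted := dfsB [] lst none
  (PySem.List.pyRange 1 ((lst.length : Int) + 1) 1).foldl
    (fun result r =>
      emitted.foldl
        (fun result seq =>
          if ((seq.length : Int) == r) then PySem.Set.add result seq else result)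
        result)
    PySem.Set.empty

-- ===== PRECONDITION & SPEC =====
def Spec_get_all_length_combinations (lst : List String) (out : List (List String)) : Prop := out = get_all_length_combinations_alt lst
instance (lst : List String) (out : List (List String)) : Decidable (Spec_get_all_length_combinations lst out) := by unfold Spec_get_all_length_combinations; infer_instance

-- ===== CLAIM (what is proved, stated in full; the proofs are below) =====
def Claim_equal_get_all_length_combinations : Prop := ∀ (lst : List String), Dom_get_all_length_combinations lst → Spec_get_all_length_combinations lst (get_all_length_combinations lst)

-- ===== LEMMAS AND PROOFS =====

theorem flatMap_attach' {α β : Type} (l : List α) (F : α → List β) :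
    l.attach.flatMap (fun q => F q.val) = l.flatMap F := by simp

-- attach-free unfolding of dfsB
theorem dfsB_eq (pre pool : List String) (last : Option String) :
    dfsB pre pool last = (picksB pool).flatMap (fun p =>
      if some p.1 = last then []
      else (pre ++ [p.1]) :: dfsB (pre ++ [p.1]) p.2 (some p.1)) := by
  rw [dfsB]
  simp only [ne_eq, ite_not]
  exact flatMap_attach' (picksB pool)
    (fun p => if some p.1 = last then []
      else (pre ++ [p.1]) :: dfsB (pre ++ [p.1]) p.2 (some p.1))

-- "no consecutive duplicates continuing from last" — the invariant B's pruning maintains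
def okSeq (last : Option String) : List String → Bool
  | [] => true
  | x :: xs => (!(some x == last)) && okSeq (some x) xs

theorem permsA_zero (xs : List String) : PySem.List.permutations xs 0 = [[]] := by
  rw [PySem.List.permutations]

theorem hcd_cons (x y : String) (t : List String) :
    hasConsecDupA (x :: y :: t) = ((x == y) || hasConsecDupA (y :: t)) := by
  simp [hasConsecDupA, PySem.List.slice_from_one]

theorem okSeq_some : ∀ (xs : List String) (x : String),
    okSeq (some x) xs = !hasConsecDupA (x :: xs) := by
  intro xs
  induction xs with
  | nil => intro x; simp [okSeq, hasConsecDupA, PySem.List.slice_from_one]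
  | cons y t ih =>
    intro x
    rw [okSeq, ih y, hcd_cons]
    by_cases hxy : x = y
    · subst hxy; simp
    · have h1 : (x == y) = false := beq_eq_false_iff_ne.mpr hxy
      have h2 : (y == x) = false := beq_eq_false_iff_ne.mpr (fun e => hxy e.symm)
      simp [h1, h2]

theorem okSeq_none (s : List String) : okSeq none s = !hasConsecDupA s := by
  cases s with
  | nil => simp [okSeq, hasConsecDupA, PySem.List.slice_from_one]
  | cons x t => rw [okSeq, okSeq_some t x]; simp

-- itertools.permutations, one selection step, through picksB
def optArm (g : String → List String → List (List String)) (xs : List String) (i : Nat) :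
    List (List String) :=
  match xs[i]? with
  | none => []
  | some a => g a (xs.eraseIdx i)

theorem range_pick (g : String → List String → List (List String)) :
    ∀ (xs : List String),
    (List.range xs.length).flatMap (optArm g xs) = (picksB xs).flatMap (fun p => g p.1 p.2) := by
  intro xs
  induction xs generalizing g with
  | nil => simp [picksB]
  | cons x xs ih =>
    simp only [List.length_cons, List.range_succ_eq_map, List.flatMap_cons, List.flatMap_map,
      picksB]
    have h0 : optArm g (x :: xs) 0 = g x xs := by simp [optArm]
    have hs : ∀ i : Nat, optArm g (x :: xs) (i + 1) = optArm (fun a t => g a (x :: t)) xs i := by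
      intro i; cases h : xs[i]? <;> simp [optArm, h]
    rw [h0]
    congr 1
    · rw [show (fun i => optArm g (x :: xs) (i + 1)) = optArm (fun a t => g a (x :: t)) xs from
        funext hs]
      exact ih (fun a t => g a (x :: t))

theorem perms_succ (xs : List String) (r : Nat) :
    PySem.List.permutations xs (r + 1)
    = (picksB xs).flatMap (fun p => (PySem.List.permutations p.2 r).map (p.1 :: ·)) := by
  have h1 : PySem.List.permutations xs (r + 1)
      = (List.range xs.length).flatMap
          (optArm (fun a t => (PySem.List.permutations t r).map (a :: ·)) xs) := by
    rw [PySem.List.permutations]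
    refine List.flatMap_congr (fun i hi => ?_)
    cases h : xs[i]? <;> simp [optArm, h]
  rw [h1, range_pick]

-- every emitted sequence strictly extends the prefix
theorem dfsB_len : ∀ (n : Nat) (pool : List String), pool.length ≤ n →
    ∀ (pre : List String) (last : Option String) (s : List String),
    s ∈ dfsB pre pool last → pre.length < s.length := by
  intro n
  induction n with
  | zero =>
    intro pool hp pre last s hs
    have : pool = [] := List.length_eq_zero_iff.mp (Nat.le_zero.mp hp)
    subst this
    rw [dfsB_eq] at hs
    simp [picksB] at hs
  | succ n ih =>
    intro pool hp pre last s hs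
    rw [dfsB_eq] at hs
    simp only [List.mem_flatMap] at hs
    obtain ⟨p, hpm, hs⟩ := hs
    split at hs
    · simp at hs
    · rcases List.mem_cons.mp hs with rfl | hs
      · simp
      · have hlen : p.2.length ≤ n := by
          have := picksB_mem_length hpm; omega
        have := ih p.2 hlen (pre ++ [p.1]) (some p.1) s hs
        simp at this; omega

-- main invariant: emitted sequences of length |pre|+k+1 are exactly the filtered (k+1)-permutations
theorem dfs_filter : ∀ (n : Nat) (pool : List String), pool.length ≤ n →
    ∀ (pre : List String) (last : Option String) (k : Nat),
    (dfsB pre pool last).filter (fun s => s.length == pre.length + (k + 1))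
    = ((PySem.List.permutations pool (k + 1)).filter (okSeq last)).map (fun s => pre ++ s) := by
  intro n
  induction n with
  | zero =>
    intro pool hp pre last k
    have : pool = [] := List.length_eq_zero_iff.mp (Nat.le_zero.mp hp)
    subst this
    rw [dfsB_eq, perms_succ]
    simp [picksB]
  | succ n ih =>
    intro pool hp pre last k
    rw [dfsB_eq, perms_succ, List.filter_flatMap, List.filter_flatMap, List.map_flatMap]
    refine List.flatMap_congr (fun p hpm => ?_)
    have hrest : p.2.length ≤ n := by have := picksB_mem_length hpm; omega
    by_cases hx : some p.1 = last
    · rw [if_pos hx]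
      rw [List.filter_nil, List.filter_map]
      have : ∀ s ∈ PySem.List.permutations p.2 k, (okSeq last ∘ (p.1 :: ·)) s = false := by
        intro s _; simp [okSeq, ← hx]
      rw [List.filter_congr this]
      simp
    · rw [if_neg hx, List.filter_cons]
      cases k with
      | zero =>
        have hhead : ((pre ++ [p.1]).length == pre.length + (0 + 1)) = true := by simp
        rw [if_pos hhead]
        have htail : (dfsB (pre ++ [p.1]) p.2 (some p.1)).filter
            (fun s => s.length == pre.length + (0 + 1)) = [] := by
          rw [List.filter_eq_nil_iff]
          intro s hs
          have := dfsB_len n p.2 hrest (pre ++ [p.1]) (some p.1) s hs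
          simp only [List.length_append, List.length_cons, List.length_nil] at this
          simp only [beq_iff_eq]; omega
        rw [htail, permsA_zero]
        simp [okSeq, hx]
      | succ k' =>
        have hhead : ((pre ++ [p.1]).length == pre.length + (k' + 1 + 1)) = false := by
          simp only [List.length_append, List.length_cons, List.length_nil]
          rw [beq_eq_false_iff_ne]
          omega
        simp only [hhead, Bool.false_eq_true, if_false]
        have hpred : ∀ s ∈ dfsB (pre ++ [p.1]) p.2 (some p.1),
            (s.length == pre.length + (k' + 1 + 1))
            = (s.length == (pre ++ [p.1]).length + (k' + 1)) := by
          intro s _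
          have : pre.length + (k' + 1 + 1) = (pre ++ [p.1]).length + (k' + 1) := by
            simp only [List.length_append, List.length_cons, List.length_nil]
            omega
          rw [this]
        rw [List.filter_congr hpred, ih p.2 hrest (pre ++ [p.1]) (some p.1) k']
        rw [List.filter_map, List.map_map]
        have : ∀ s ∈ PySem.List.permutations p.2 (k' + 1),
            (okSeq last ∘ (p.1 :: ·)) s = okSeq (some p.1) s := by
          intro s _; simp [okSeq, hx]
        rw [List.filter_congr this]
        refine List.map_congr_left (fun s _ => ?_)
        simp

-- the per-length lists of the two ports coincide
theorem lists_eq (lst : List String) (r : Int) (hr : 1 ≤ r) :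
    (PySem.List.permutations lst r.toNat).filter (fun s => !hasConsecDupA s)
    = (dfsB [] lst none).filter (fun s => ((s.length : Int) == r)) := by
  obtain ⟨k, hk⟩ : ∃ k : Nat, r.toNat = k + 1 := ⟨r.toNat - 1, by omega⟩
  have hpred : ∀ s ∈ dfsB [] lst none,
      ((s.length : Int) == r) = (s.length == ([] : List String).length + (k + 1)) := by
    intro s _
    rw [Bool.eq_iff_iff]
    simp only [beq_iff_eq, List.length_nil, Nat.zero_add]
    omega
  rw [List.filter_congr hpred, dfs_filter lst.length lst le_rfl [] none k, ← hk]
  have : ∀ s ∈ PySem.List.permutations lst r.toNat, okSeq none s = !hasConsecDupA s := by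
    intro s _; exact okSeq_none s
  rw [List.filter_congr this]
  simp

-- ===== VERDICT (by name: the statement is the Claim_ definition above) =====
theorem get_all_length_combinations_spec : Claim_equal_get_all_length_combinations := by
  intro lst _
  unfold Spec_get_all_length_combinations
  simp only [get_all_length_combinations, get_all_length_combinations_alt]
  apply PySem.List.foldl_congr_mem
  intro acc r hr
  have hr1 : 1 ≤ r := (PySem.List.mem_pyRange_one.mp hr).1
  rw [PySem.List.foldl_if_eq_foldl_filter, PySem.List.foldl_if_eq_foldl_filter,
    lists_eq lst r hr1]
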